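-- pv_equiv track=rewrite | github.com/CKPEIIKA/ofti | ofti/core/solver_status.py | fatal_log_line
-- ===== SOURCE A (Python) =====
-- from collections.abc import Iterable
--
-- def fatal_log_line(lines: Iterable[str]) -> str | None:
--     markers = [
--         "FOAM FATAL ERROR",
--         "FATAL ERROR",
--         "Cannot open file",
--         "cannot open file",
--         "cannot find file",
--         "No such file",
--         "file: ",
--     ]
--     for line in reversed(list(lines)):
--         for marker in markers:
--             if marker in line:
--                 return line.strip()
--     return None
-- ===== SOURCE B (Python) =====
-- def fatal_log_line(lines):
--     markers = [
--         "FOAM FATAL ERROR",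
--         "FATAL ERROR",
--         "Cannot open file",
--         "cannot open file",
--         "cannot find file",
--         "No such file",
--         "file: ",
--     ]
--     result = None
--     for line in lines:
--         if any(m in line for m in markers):
--             result = line.strip()
--     return result
-- ===== Notes on version B (the rewrite author's own statement) =====
-- stated objective: alternative
-- what changed: Single forward pass keeping the last matching line in an accumulator, instead of reversing the list and returning on the first match of a nested marker loop.
import Mathlib
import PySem

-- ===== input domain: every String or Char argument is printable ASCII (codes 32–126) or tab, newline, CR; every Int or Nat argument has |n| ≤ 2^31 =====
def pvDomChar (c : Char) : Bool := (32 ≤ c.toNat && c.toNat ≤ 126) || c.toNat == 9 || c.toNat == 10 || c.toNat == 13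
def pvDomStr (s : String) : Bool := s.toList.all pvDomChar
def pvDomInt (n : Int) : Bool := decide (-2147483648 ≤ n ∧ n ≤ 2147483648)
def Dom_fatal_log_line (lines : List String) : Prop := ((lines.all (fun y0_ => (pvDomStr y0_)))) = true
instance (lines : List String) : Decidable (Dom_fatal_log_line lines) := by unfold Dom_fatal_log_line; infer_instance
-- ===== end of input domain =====

-- B replaces A's reverse-then-first-match nested loop by one forward pass keeping the last matching line; same results.
-- ===== PORT A =====
def pvMarkers : List String :=
  ["FOAM FATAL ERROR", "FATAL ERROR", "Cannot open file", "cannot open file",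
   "cannot find file", "No such file", "file: "]

-- inner 'for marker in markers: if marker in line: return line.strip()'
def pvCheckMarkers (line : String) : List String → Option String
  | [] => none
  | m :: ms => if PySem.Str.isIn m line then some (PySem.Str.strip line) else pvCheckMarkers line ms

-- outer 'for line in reversed(list(lines)): ... return None'
def pvGoA : List String → Option String
  | [] => none
  | l :: ls =>
    match pvCheckMarkers l pvMarkers with
    | some r => some r
    | none => pvGoA ls

def fatal_log_line (lines : List String) : Option String :=
  pvGoA lines.reverse

-- ===== PORT B =====
def pvHit (line : String) : Bool :=
  pvMarkers.any (fun m => PySem.Str.isIn m line)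

def fatal_log_line_alt (lines : List String) : Option String :=
  lines.foldl (fun res line => if pvHit line then some (PySem.Str.strip line) else res) none

-- ===== PRECONDITION & SPEC =====
def Spec_fatal_log_line (lines : List String) (out : Option String) : Prop := out = fatal_log_line_alt lines
instance (lines : List String) (out : Option String) : Decidable (Spec_fatal_log_line lines out) := by unfold Spec_fatal_log_line; infer_instance

-- ===== CLAIM (what is proved, stated in full; the proofs are below) =====
def Claim_equal_fatal_log_line : Prop := ∀ (lines : List String), Dom_fatal_log_line lines → Spec_fatal_log_line lines (fatal_log_line lines)

-- ===== LEMMAS AND PROOFS =====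
lemma pvCheckMarkers_eq (line : String) (ms : List String) :
    pvCheckMarkers line ms =
      if ms.any (fun m => PySem.Str.isIn m line) then some (PySem.Str.strip line) else none := by
  induction ms with
  | nil => simp [pvCheckMarkers]
  | cons m ms ih =>
    rw [pvCheckMarkers, ih, List.any_cons]
    cases hm : PySem.Str.isIn m line with
    | true => simp
    | false => simp

lemma pvGoA_eq (ls : List String) :
    pvGoA ls = (ls.find? pvHit).map PySem.Str.strip := by
  induction ls with
  | nil => simp [pvGoA]
  | cons l ls ih =>
    rw [pvGoA, pvCheckMarkers_eq]
    by_cases h : pvMarkers.any (fun m => PySem.Str.isIn m l) = true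
    · rw [if_pos h, List.find?_cons_of_pos (by simpa [pvHit] using h)]
      rfl
    · rw [if_neg h, List.find?_cons_of_neg (by simpa [pvHit] using h), ih]

lemma pvFoldl_eq (ls : List String) (acc : Option String) :
    ls.foldl (fun res line => if pvHit line then some (PySem.Str.strip line) else res) acc =
      match ls.reverse.find? pvHit with
      | some l => some (PySem.Str.strip l)
      | none => acc := by
  induction ls generalizing acc with
  | nil => simp
  | cons l ls ih =>
    simp only [List.foldl_cons, ih, List.reverse_cons, List.find?_append]
    cases h : ls.reverse.find? pvHit with
    | some r => simp
    | none =>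
      by_cases hl : pvHit l <;> simp [List.find?, hl]

-- ===== VERDICT (by name: the statement is the Claim_ definition above) =====
theorem fatal_log_line_spec : Claim_equal_fatal_log_line := by
  intro lines _
  unfold Spec_fatal_log_line fatal_log_line fatal_log_line_alt
  rw [pvGoA_eq, pvFoldl_eq]
  cases lines.reverse.find? pvHit <;> simp
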